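-- pv_equiv track=rewrite | github.com/yaeba/binary-search-solutions | solutions/Roomba.py | solve
-- ===== SOURCE A (Python) =====
-- def solve(moves, x, y):
--     newX = 0
--     newY = 0
--
--     for move in moves:
--         if move == "NORTH":
--             newY += 1
--         elif move == "SOUTH":
--             newY -= 1
--         elif move == "EAST":
--             newX += 1
--         elif move == "WEST":
--             newX -= 1
--
--     return newX == x and newY == y
-- ===== SOURCE B (Python) =====
-- def solve(moves, x, y):
--     # Sort the moves once, then count each direction by binary search
--     # (bisect-style lower/upper bound) on the sorted list: equal moves
--     # form a contiguous block, so its width is the count.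
--     s = sorted(moves)
--
--     def lower(v):
--         lo, hi = 0, len(s)
--         while lo < hi:
--             mid = (lo + hi) // 2
--             if s[mid] < v:
--                 lo = mid + 1
--             else:
--                 hi = mid
--         return lo
--
--     def upper(v):
--         lo, hi = 0, len(s)
--         while lo < hi:
--             mid = (lo + hi) // 2
--             if v < s[mid]:
--                 hi = mid
--             else:
--                 lo = mid + 1
--         return lo
--
--     def cnt(v):
--         return upper(v) - lower(v)
--
--     return (cnt("EAST") - cnt("WEST") == x
--             and cnt("NORTH") - cnt("SOUTH") == y)
-- ===== Notes on version B (the rewrite author's own statement) =====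
-- stated objective: alternative
-- what changed: Replaced the four-way branching accumulator loop with sort-then-binary-search: the moves are sorted once and each direction's count is obtained as the width of its contiguous block via hand-written lower/upper-bound binary searches, then the displacement is a closed-form expression over those counts.
import Mathlib
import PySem

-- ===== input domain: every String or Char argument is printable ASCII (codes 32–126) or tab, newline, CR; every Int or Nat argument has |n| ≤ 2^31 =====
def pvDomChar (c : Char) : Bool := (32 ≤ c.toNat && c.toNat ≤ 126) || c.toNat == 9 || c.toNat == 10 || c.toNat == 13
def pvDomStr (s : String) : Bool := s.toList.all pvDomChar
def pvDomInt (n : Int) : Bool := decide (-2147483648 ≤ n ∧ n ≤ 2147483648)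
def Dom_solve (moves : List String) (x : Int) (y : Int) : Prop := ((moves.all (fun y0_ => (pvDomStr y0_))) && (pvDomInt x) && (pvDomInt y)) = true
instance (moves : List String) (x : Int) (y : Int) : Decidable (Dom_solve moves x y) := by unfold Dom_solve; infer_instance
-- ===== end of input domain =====

-- B replaces A's four-way branching accumulator loop with sort-then-binary-search:
-- the moves are sorted once, each direction's count is the width of its block found
-- by lower/upper-bound binary search, and the result is a formula over those counts
-- (objective: alternative; not claimed faster).

-- ===== PORT A =====
def solve (moves : List String) (x : Int) (y : Int) : Bool :=
  let s := moves.foldl (fun (p : Int × Int) move =>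
    if move == "NORTH" then (p.1, p.2 + 1)
    else if move == "SOUTH" then (p.1, p.2 - 1)
    else if move == "EAST" then (p.1 + 1, p.2)
    else if move == "WEST" then (p.1 - 1, p.2)
    else p) ((0 : Int), (0 : Int))
  s.1 == x && s.2 == y

-- ===== PORT B =====
-- hand-written lower-bound binary search, as in Source B ('lower'); exact step for step
def lowerLoop (s : List String) (v : String) (lo hi : Nat) : Nat :=
  if _h : lo < hi then
    -- mid = (lo + hi) // 2, inlined
    if s.getD ((lo + hi) / 2) "" < v then lowerLoop s v ((lo + hi) / 2 + 1) hi
    else lowerLoop s v lo ((lo + hi) / 2)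
  else lo
termination_by hi - lo
decreasing_by all_goals omega

-- hand-written upper-bound binary search, as in Source B ('upper'); exact step for step
def upperLoop (s : List String) (v : String) (lo hi : Nat) : Nat :=
  if _h : lo < hi then
    -- mid = (lo + hi) // 2, inlined
    if v < s.getD ((lo + hi) / 2) "" then upperLoop s v lo ((lo + hi) / 2)
    else upperLoop s v ((lo + hi) / 2 + 1) hi
  else lo
termination_by hi - lo
decreasing_by all_goals omega

def solve_alt (moves : List String) (x : Int) (y : Int) : Bool :=
  let s := PySem.List.sorted moves (fun m => m) false
  let cnt := fun (v : String) =>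
    (upperLoop s v 0 s.length : Int) - (lowerLoop s v 0 s.length : Int)
  (cnt "EAST" - cnt "WEST" == x) && (cnt "NORTH" - cnt "SOUTH" == y)

-- ===== PRECONDITION & SPEC =====
def Spec_solve (moves : List String) (x : Int) (y : Int) (out : Bool) : Prop := out = solve_alt moves x y
instance (moves : List String) (x : Int) (y : Int) (out : Bool) : Decidable (Spec_solve moves x y out) := by unfold Spec_solve; infer_instance

-- ===== CLAIM (what is proved, stated in full; the proofs are below) =====
def Claim_equal_solve : Prop := ∀ (moves : List String) (x : Int) (y : Int), Dom_solve moves x y → Spec_solve moves x y (solve moves x y)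

-- ===== LEMMAS AND PROOFS =====

-- A's loop computes the net EAST−WEST / NORTH−SOUTH counts.
theorem solve_foldl_counts (moves : List String) (a b : Int) :
    moves.foldl (fun (p : Int × Int) move =>
      if move == "NORTH" then (p.1, p.2 + 1)
      else if move == "SOUTH" then (p.1, p.2 - 1)
      else if move == "EAST" then (p.1 + 1, p.2)
      else if move == "WEST" then (p.1 - 1, p.2)
      else p) (a, b)
    = (a + (moves.count "EAST" : Int) - (moves.count "WEST" : Int),
       b + (moves.count "NORTH" : Int) - (moves.count "SOUTH" : Int)) := by
  induction moves generalizing a b with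
  | nil => simp
  | cons m t ih =>
    simp only [List.foldl_cons, List.count_cons]
    split_ifs with h1 h2 h3 h4 <;> rw [ih] <;>
      simp_all [Prod.ext_iff] <;> omega

-- counting: if p holds on exactly the first k positions, countP p = k
theorem countP_eq_of_iff_lt (p : String → Bool) (s : List String) :
    ∀ (k : Nat), k ≤ s.length →
      (∀ (i : Nat) (h : i < s.length), p s[i] ↔ i < k) →
      s.countP p = k := by
  induction s with
  | nil => intro k hk _; simp at hk; simp [hk]
  | cons a t ih =>
    intro k hk hiff
    have h0 := hiff 0 (by simp)
    match k with
    | 0 =>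
      have hpa : p a = false := by
        by_contra h
        have : p a = true := by simpa using h
        exact absurd ((h0).mp (by simpa using this)) (by omega)
      have ht : t.countP p = 0 := ih 0 (by omega) (fun i h => by
        have := hiff (i + 1) (by simpa using Nat.succ_lt_succ h)
        simpa using this)
      simp [hpa, ht]
    | k' + 1 =>
      have hpa : p a = true := by simpa using (h0).mpr (by omega)
      have ht : t.countP p = k' := ih k' (by simpa using hk) (fun i h => by
        have := hiff (i + 1) (by simpa using Nat.succ_lt_succ h)
        simpa [Nat.succ_lt_succ_iff] using this)
      simp [hpa, ht]

-- the lower-bound binary search invariant: result = countP (· < v)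
theorem lowerLoop_spec (s : List String) (v : String)
    (hsort : s.Pairwise (· ≤ ·)) :
    ∀ (lo hi : Nat), lo ≤ hi → hi ≤ s.length →
      (∀ (i : Nat) (h : i < s.length), i < lo → s[i] < v) →
      (∀ (i : Nat) (h : i < s.length), hi ≤ i → ¬ s[i] < v) →
      lowerLoop s v lo hi = s.countP (fun a => decide (a < v)) := by
  intro lo hi
  induction hn : hi - lo using Nat.strong_induction_on generalizing lo hi with
  | _ n ih =>
  intro hlh hhl hlo hhi
  rw [lowerLoop]
  split_ifs with h hc
  · have hmid : (lo + hi) / 2 < s.length := by omega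
    rw [List.getD_eq_getElem s "" hmid] at hc
    have hmono := List.pairwise_iff_getElem.mp hsort
    exact ih (hi - ((lo + hi) / 2 + 1)) (by omega) _ _ rfl (by omega) hhl
      (fun i h' hi' => by
        rcases Nat.lt_or_ge i ((lo + hi) / 2) with hlt | hge
        · exact lt_of_le_of_lt (hmono i ((lo+hi)/2) h' hmid hlt) hc
        · have : i = (lo + hi) / 2 := by omega
          subst this; exact hc)
      hhi
  · have hmid : (lo + hi) / 2 < s.length := by omega
    rw [List.getD_eq_getElem s "" hmid] at hc
    have hmono := List.pairwise_iff_getElem.mp hsort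
    exact ih (((lo + hi) / 2) - lo) (by omega) _ _ rfl (by omega) (by omega) hlo
      (fun i h' hi' => by
        rcases Nat.lt_or_ge ((lo + hi) / 2) i with hlt | hge
        · intro hvi
          exact hc (lt_of_le_of_lt (hmono ((lo+hi)/2) i hmid h' hlt) hvi)
        · have : i = (lo + hi) / 2 := by omega
          subst this; exact hc)
  · have hlh' : lo = hi := by omega
    subst hlh'
    refine (countP_eq_of_iff_lt (fun a => decide (a < v)) s lo hhl (fun i h' => ?_)).symm
    constructor
    · intro hp
      by_contra hge
      exact (hhi i h' (by omega)) (by simpa using hp)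
    · intro hil
      simpa using hlo i h' hil

-- the upper-bound binary search invariant: result = countP (· ≤ v)
theorem upperLoop_spec (s : List String) (v : String)
    (hsort : s.Pairwise (· ≤ ·)) :
    ∀ (lo hi : Nat), lo ≤ hi → hi ≤ s.length →
      (∀ (i : Nat) (h : i < s.length), i < lo → s[i] ≤ v) →
      (∀ (i : Nat) (h : i < s.length), hi ≤ i → ¬ s[i] ≤ v) →
      upperLoop s v lo hi = s.countP (fun a => decide (a ≤ v)) := by
  intro lo hi
  induction hn : hi - lo using Nat.strong_induction_on generalizing lo hi with
  | _ n ih =>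
  intro hlh hhl hlo hhi
  rw [upperLoop]
  split_ifs with h hc
  · have hmid : (lo + hi) / 2 < s.length := by omega
    rw [List.getD_eq_getElem s "" hmid] at hc
    have hmono := List.pairwise_iff_getElem.mp hsort
    exact ih (((lo + hi) / 2) - lo) (by omega) _ _ rfl (by omega) (by omega) hlo
      (fun i h' hi' => by
        rcases Nat.lt_or_ge ((lo + hi) / 2) i with hlt | hge
        · intro hvi
          exact absurd (lt_of_lt_of_le hc ((hmono ((lo+hi)/2) i hmid h' hlt).trans hvi)) (lt_irrefl v)
        · have : i = (lo + hi) / 2 := by omega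
          subst this; exact not_le.mpr hc)
  · have hmid : (lo + hi) / 2 < s.length := by omega
    rw [List.getD_eq_getElem s "" hmid] at hc
    have hmono := List.pairwise_iff_getElem.mp hsort
    exact ih (hi - ((lo + hi) / 2 + 1)) (by omega) _ _ rfl (by omega) hhl
      (fun i h' hi' => by
        rcases Nat.lt_or_ge i ((lo + hi) / 2) with hlt | hge
        · exact le_trans (hmono i ((lo+hi)/2) h' hmid hlt) (not_lt.mp hc)
        · have : i = (lo + hi) / 2 := by omega
          subst this; exact not_lt.mp hc)
      hhi
  · have hlh' : lo = hi := by omega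
    subst hlh'
    refine (countP_eq_of_iff_lt (fun a => decide (a ≤ v)) s lo hhl (fun i h' => ?_)).symm
    constructor
    · intro hp
      by_contra hge
      exact (hhi i h' (by omega)) (by simpa using hp)
    · intro hil
      simpa using hlo i h' hil

-- countP (· ≤ v) = countP (· < v) + count v  (block-width = count)
theorem countP_le_split (s : List String) (v : String) :
    s.countP (fun a => decide (a ≤ v))
      = s.countP (fun a => decide (a < v)) + s.count v := by
  induction s with
  | nil => simp
  | cons a t ih =>
    simp only [List.countP_cons, List.count_cons, ih, decide_eq_true_eq, beq_iff_eq]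
    rcases lt_trichotomy a v with h | h | h
    · rw [if_pos (le_of_lt h), if_pos h, if_neg (ne_of_lt h)]
      omega
    · subst h
      rw [if_pos (le_refl a), if_neg (lt_irrefl a), if_pos rfl]
      omega
    · rw [if_neg (not_le.mpr h), if_neg (not_lt.mpr (le_of_lt h)), if_neg (ne_of_gt h)]
      omega

-- B's cnt v on the sorted list equals the count of v in moves
theorem cnt_eq_count (moves : List String) (v : String) :
    (upperLoop (PySem.List.sorted moves (fun m => m) false) v 0
        (PySem.List.sorted moves (fun m => m) false).length : Int)
      - (lowerLoop (PySem.List.sorted moves (fun m => m) false) v 0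
          (PySem.List.sorted moves (fun m => m) false).length : Int)
      = (moves.count v : Int) := by
  set s := PySem.List.sorted moves (fun m => m) false with hs
  have hsort : s.Pairwise (· ≤ ·) := by
    simpa using PySem.List.sorted_pairwise moves (fun m => m)
  have hlow := lowerLoop_spec s v hsort 0 s.length (Nat.zero_le _) (le_refl _)
    (fun i h hi => by omega) (fun i h hi => by omega)
  have hup := upperLoop_spec s v hsort 0 s.length (Nat.zero_le _) (le_refl _)
    (fun i h hi => by omega) (fun i h hi => by omega)
  have hperm : s.Perm moves := PySem.List.sorted_perm moves (fun m => m) false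
  rw [hlow, hup, countP_le_split s v, hperm.count_eq]
  push_cast
  ring

-- ===== VERDICT (by name: the statement is the Claim_ definition above) =====
theorem solve_spec : Claim_equal_solve := by
  intro moves x y _
  unfold Spec_solve solve solve_alt
  rw [solve_foldl_counts]
  simp only [cnt_eq_count]
  simp
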